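-- pv_equiv track=rewrite | github.com/QHarshil/ctc-and-nlp-algorithms | other_algorithms/phoneme.py | find_word_combos_with_pronunciation
-- ===== SOURCE A (Python) =====
-- from typing import List, Dict, Sequence
--
-- PHONEME_DICT = {
--     "ABACUS": ["A", "B", "AH", "K", "S"],
--     "BOOK": ["B", "UH", "K"],
--     "TH": ["T", "H"],
--     "DER": ["D", "EH", "R"],
--     "THE": ["DH", "EH"],
--     "THEIR": ["DH", "EH", "R"],
--     "THERE": ["DH", "EH", "R"],
--     "TOMATO": ["T", "AH", "M", "EY", "T", "OW"],
--     "TAMA": ["T", "AH", "M", "AH"],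
--     "TOM": ["T", "AH", "M"]
-- }
--
-- def build_length_map(word_dict: Dict[str, List[str]]) -> Dict[int, List[tuple]]:
--     """
--     Builds a helper structure:
--       length_map[L] = list of (word, phoneme_sequence)
--     where L = len(phoneme_sequence).
--     """
--     length_map: Dict[int, List[tuple]] = {}
--     for word, ph_list in word_dict.items():
--         length_map.setdefault(len(ph_list), []).append((word, ph_list))
--     return length_map
--
-- def find_word_combos_with_pronunciation(phonemes: Sequence[str]) -> List[List[str]]:
--     """
--     Given a sequence of phonemes, returns ALL possible combinations of words
--     from PHONEME_DICT that produce exactly this phoneme sequence (in order).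
--
--     Example:
--       If phonemes = ["DH", "EH", "R"], valid outputs could be:
--          [["THEIR"], ["THERE"]]
--       (assuming 'THEIR' and 'THERE' share the same phoneme sequence).
--     """
--     # Create the helper structure
--     length_map = build_length_map(PHONEME_DICT)
--
--     # DFS with memoization to find all solutions
--     memo = {}  # key = start_index in 'phonemes', value = list of valid combos
--
--     def backtrack(i: int) -> List[List[str]]:
--         # If we’ve reached the end of the phoneme list, one valid combination is "no words left to match"
--         if i == len(phonemes):
--             return [[]]  # One complete (empty) solution from here
--
--         if i in memo:
--             return memo[i]
--
--         results = []
--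
--         # Try all possible segment lengths L that won't go out of bounds
--         for L, word_pairs in length_map.items():
--             end = i + L
--             if end <= len(phonemes):
--                 segment = phonemes[i:end]
--                 # Compare with each (word, phoneme_list) of the same length
--                 for word, ph_list in word_pairs:
--                     if ph_list == list(segment):
--                         # If the segment matches this word’s phoneme sequence,
--                         # recurse on the remainder
--                         for suffix_combo in backtrack(end):
--                             results.append([word] + suffix_combo)
--
--         memo[i] = results
--         return results
--
--     return backtrack(0)
-- ===== SOURCE B (Python) =====
-- from typing import List, Dict, Sequence
--
-- PHONEME_DICT = {
--     "ABACUS": ["A", "B", "AH", "K", "S"],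
--     "BOOK": ["B", "UH", "K"],
--     "TH": ["T", "H"],
--     "DER": ["D", "EH", "R"],
--     "THE": ["DH", "EH"],
--     "THEIR": ["DH", "EH", "R"],
--     "THERE": ["DH", "EH", "R"],
--     "TOMATO": ["T", "AH", "M", "EY", "T", "OW"],
--     "TAMA": ["T", "AH", "M", "AH"],
--     "TOM": ["T", "AH", "M"]
-- }
--
-- def find_word_combos_with_pronunciation(phonemes: Sequence[str]) -> List[List[str]]:
--     """Bottom-up DP: dp[i] = all word combos matching phonemes[i:], filled back to front."""
--     length_map: Dict[int, List[tuple]] = {}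
--     for word, ph_list in PHONEME_DICT.items():
--         length_map.setdefault(len(ph_list), []).append((word, ph_list))
--
--     n = len(phonemes)
--     dp = [None] * n + [[[]]]
--     for i in range(n - 1, -1, -1):
--         combos = []
--         for L, word_pairs in length_map.items():
--             end = i + L
--             if end <= n:
--                 segment = list(phonemes[i:end])
--                 for word, ph_list in word_pairs:
--                     if ph_list == segment:
--                         for suffix in dp[end]:
--                             combos.append([word] + suffix)
--         dp[i] = combos
--     return dp[0]
-- ===== Notes on version B (the rewrite author's own statement) =====
-- stated objective: alternative
-- what changed: Replaced the top-down memoized recursion (closure backtrack + memo dict) with an explicit bottom-up DP table dp[i] of combos for phonemes[i:], filled back to front with the same length_map iteration order.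
import Mathlib
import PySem

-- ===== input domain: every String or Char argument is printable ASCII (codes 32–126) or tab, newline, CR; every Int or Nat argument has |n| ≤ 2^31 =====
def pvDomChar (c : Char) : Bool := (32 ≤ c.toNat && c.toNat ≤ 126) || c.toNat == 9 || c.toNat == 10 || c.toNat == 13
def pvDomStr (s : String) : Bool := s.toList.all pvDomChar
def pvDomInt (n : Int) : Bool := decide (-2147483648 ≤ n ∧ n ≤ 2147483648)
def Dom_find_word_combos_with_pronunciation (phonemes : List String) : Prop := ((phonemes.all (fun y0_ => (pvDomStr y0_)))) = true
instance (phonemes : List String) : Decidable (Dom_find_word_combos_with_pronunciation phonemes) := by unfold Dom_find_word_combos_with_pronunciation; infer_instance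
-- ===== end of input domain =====

-- B replaces A's top-down memoized recursion with an explicit bottom-up DP table over suffix
-- start positions (same iteration order, hence identical output); objective: alternative.

-- ===== PORT A =====
-- length_map = build_length_map(PHONEME_DICT): insertion order of the dict gives
-- lengths 5, 3, 2, 6, 4 with these (word, phoneme_list) buckets (a module constant,
-- so the 'for L, word_pairs in length_map.items()' loop is unrolled into its five
-- iterations below, in the same order).
def pairs5 : List (String × List String) := [("ABACUS", ["A","B","AH","K","S"])]
def pairs3 : List (String × List String) :=
  [("BOOK", ["B","UH","K"]), ("DER", ["D","EH","R"]), ("THEIR", ["DH","EH","R"]),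
   ("THERE", ["DH","EH","R"]), ("TOM", ["T","AH","M"])]
def pairs2 : List (String × List String) := [("TH", ["T","H"]), ("THE", ["DH","EH"])]
def pairs6 : List (String × List String) := [("TOMATO", ["T","AH","M","EY","T","OW"])]
def pairs4 : List (String × List String) := [("TAMA", ["T","AH","M","AH"])]

-- the inner 'for word, ph_list in word_pairs: … results.append([word] + suffix_combo)'
-- loop for one length bucket (rec = backtrack(end), the memoized recursive result)
def tryLen (pairs : List (String × List String)) (seg : List String)
    (rec : List (List String)) : List (List String) :=
  pairs.foldl (fun r p => if p.2 = seg then r ++ rec.map (fun s => p.1 :: s) else r) []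

-- backtrack(i) ported on the suffix phonemes[i:] (so phonemes[i:i+L] = suf.take L and
-- backtrack(i+L) = btA (suf.drop L)); the memo cache only avoids recomputation and is
-- value-irrelevant, so it is dropped.
def btA (suf : List String) : List (List String) :=
  if _h : suf.length = 0 then [[]]
  else
    (if 5 ≤ suf.length then tryLen pairs5 (suf.take 5) (btA (suf.drop 5)) else []) ++
    (if 3 ≤ suf.length then tryLen pairs3 (suf.take 3) (btA (suf.drop 3)) else []) ++
    (if 2 ≤ suf.length then tryLen pairs2 (suf.take 2) (btA (suf.drop 2)) else []) ++
    (if 6 ≤ suf.length then tryLen pairs6 (suf.take 6) (btA (suf.drop 6)) else []) ++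
    (if 4 ≤ suf.length then tryLen pairs4 (suf.take 4) (btA (suf.drop 4)) else [])
termination_by suf.length
decreasing_by all_goals (simp; omega)

def find_word_combos_with_pronunciation (phonemes : List String) : List (List String) :=
  btA phonemes

-- ===== PORT B =====
-- length_map built from PHONEME_DICT in Source B, as a literal association list (same order)
def lengthMapB : List (Nat × List (String × List String)) :=
  [(5, pairs5), (3, pairs3), (2, pairs2), (6, pairs6), (4, pairs4)]

-- the DP table: buildB ph = [dp[0], dp[1], …, dp[n]] where dp[j] is the combo list for
-- the suffix ph.drop j; Source B fills dp back to front, which is this right-to-left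
-- structural recursion (dp[i+L] = tail.getD (L-1)).
def buildB : List String → List (List (List String))
  | [] => [[[]]]
  | x :: rest =>
    let tail := buildB rest
    let combos := lengthMapB.foldl (fun acc e =>
      if e.1 ≤ (x :: rest).length then
        e.2.foldl (fun a2 p =>
          if p.2 = (x :: rest).take e.1 then
            a2 ++ (tail.getD (e.1 - 1) []).map (fun s => p.1 :: s)
          else a2) acc
      else acc) []
    combos :: tail

def find_word_combos_with_pronunciation_alt (phonemes : List String) : List (List String) :=
  (buildB phonemes).headD []

-- ===== PRECONDITION & SPEC =====
def Spec_find_word_combos_with_pronunciation (phonemes : List String) (out : List (List String)) : Prop := out = find_word_combos_with_pronunciation_alt phonemes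
instance (phonemes : List String) (out : List (List String)) : Decidable (Spec_find_word_combos_with_pronunciation phonemes out) := by unfold Spec_find_word_combos_with_pronunciation; infer_instance

-- ===== CLAIM (what is proved, stated in full; the proofs are below) =====
def Claim_equal_find_word_combos_with_pronunciation : Prop := ∀ (phonemes : List String), Dom_find_word_combos_with_pronunciation phonemes → Spec_find_word_combos_with_pronunciation phonemes (find_word_combos_with_pronunciation phonemes)

-- ===== LEMMAS AND PROOFS =====

-- pulling the accumulator out of one bucket's inner fold
theorem tryLen_shift (pairs : List (String × List String)) (seg : List String)
    (rec : List (List String)) (acc : List (List String)) :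
    pairs.foldl (fun r p => if p.2 = seg then r ++ rec.map (fun s => p.1 :: s) else r) acc
      = acc ++ tryLen pairs seg rec := by
  induction pairs generalizing acc with
  | nil => simp [tryLen]
  | cons h t ih =>
    simp only [tryLen, List.foldl_cons]
    rw [ih, ih (if h.2 = seg then [] ++ rec.map (fun s => h.1 :: s) else [])]
    split_ifs <;> simp

-- pulling the accumulator out of one length bucket of Source B's outer loop
theorem stepF_shift (x : String) (rest : List String) (tail : List (List (List String)))
    (L : Nat) (pairs : List (String × List String)) (acc : List (List String)) :
    (if L ≤ (x :: rest).length then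
       pairs.foldl (fun a2 p =>
         if p.2 = (x :: rest).take L then
           a2 ++ (tail.getD (L - 1) []).map (fun s => p.1 :: s)
         else a2) acc
     else acc)
      = acc ++ (if L ≤ (x :: rest).length then
          tryLen pairs ((x :: rest).take L) (tail.getD (L - 1) []) else []) := by
  split_ifs with h
  · exact tryLen_shift _ _ _ _
  · simp

-- the DP table entry j of buildB is exactly A's backtrack on the suffix starting at j
theorem buildB_getD (ph : List String) :
    ∀ j : Nat, j ≤ ph.length → (buildB ph).getD j [] = btA (ph.drop j) := by
  induction ph with
  | nil =>
    intro j hj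
    have : j = 0 := Nat.le_zero.mp hj
    subst this
    simp [buildB, btA]
  | cons x rest ih =>
    intro j hj
    cases j with
    | succ j' =>
      simpa [buildB] using ih j' (by simpa using hj)
    | zero =>
      have hb : ∀ L : Nat, ∀ pairs : List (String × List String), 1 ≤ L →
          (if L ≤ (x :: rest).length then
             tryLen pairs ((x :: rest).take L) ((buildB rest).getD (L - 1) []) else [])
          = (if L ≤ (x :: rest).length then
             tryLen pairs ((x :: rest).take L) (btA ((x :: rest).drop L)) else []) := by
        intro L pairs h1
        split_ifs with h
        · cases L with
          | zero => omega
          | succ L' =>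
            have := ih L' (by simp at h; omega)
            simp only [List.drop_succ_cons]
            rw [show L' + 1 - 1 = L' from rfl, this]
        · rfl
      show _ = btA (x :: rest)
      rw [btA, dif_neg (by simp)]
      simp only [buildB, lengthMapB, List.foldl_cons, List.foldl_nil, List.getD_cons_zero]
      simp only [stepF_shift]
      rw [hb 5 pairs5 (by omega), hb 3 pairs3 (by omega), hb 2 pairs2 (by omega),
          hb 6 pairs6 (by omega), hb 4 pairs4 (by omega)]
      simp [List.append_assoc]

-- ===== VERDICT (by name: the statement is the Claim_ definition above) =====
theorem find_word_combos_with_pronunciation_spec : Claim_equal_find_word_combos_with_pronunciation := by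
  intro phonemes _
  unfold Spec_find_word_combos_with_pronunciation find_word_combos_with_pronunciation
    find_word_combos_with_pronunciation_alt
  have h := buildB_getD phonemes 0 (Nat.zero_le _)
  simp only [List.drop_zero] at h
  rw [← h]
  cases buildB phonemes <;> simp [List.getD]
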